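-- pv_equiv track=rewrite | github.com/Vagacoder/HackerRank | src/Interview/Arrays/A03NewYearChaos.py | minimumBribes2
-- ===== SOURCE A (Python) =====
-- def minimumBribes2(q: list, t: int)-> int:
--     sum = 0;
--     n = len(q)
--     for i in range(n):
--         x = q[i]
--         if (x - i - 1) > t:
--             return -1
--         for j in range(i+1, n):
--             y = q[j]
--             if (x > y):
--                 sum += 1
--
--     return sum
-- ===== SOURCE B (Python) =====
-- def minimumBribes2(q: list, t: int) -> int:
--     for i, x in enumerate(q):
--         if x - i - 1 > t:
--             return -1
--
--     def sort(a):
--         if len(a) <= 1: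
--             return a, 0
--         mid = len(a) // 2
--         left, inv_l = sort(a[:mid])
--         right, inv_r = sort(a[mid:])
--         merged = []
--         inv = 0
--         i = j = 0
--         while i < len(left) and j < len(right):
--             if left[i] <= right[j]:
--                 merged.append(left[i])
--                 i += 1
--             else:
--                 merged.append(right[j])
--                 inv += len(left) - i
--                 j += 1
--         merged.extend(left[i:])
--         merged.extend(right[j:])
--         return merged, inv_l + inv_r + inv
--
--     return sort(q)[1]
-- ===== Notes on version B (the rewrite author's own statement) =====
-- stated objective: faster
-- what changed: Replaced the O(n^2) nested-scan inversion count (with interleaved early-exit displacement check) by a single upfront displacement pass plus a merge-sort inversion count.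
import Mathlib
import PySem

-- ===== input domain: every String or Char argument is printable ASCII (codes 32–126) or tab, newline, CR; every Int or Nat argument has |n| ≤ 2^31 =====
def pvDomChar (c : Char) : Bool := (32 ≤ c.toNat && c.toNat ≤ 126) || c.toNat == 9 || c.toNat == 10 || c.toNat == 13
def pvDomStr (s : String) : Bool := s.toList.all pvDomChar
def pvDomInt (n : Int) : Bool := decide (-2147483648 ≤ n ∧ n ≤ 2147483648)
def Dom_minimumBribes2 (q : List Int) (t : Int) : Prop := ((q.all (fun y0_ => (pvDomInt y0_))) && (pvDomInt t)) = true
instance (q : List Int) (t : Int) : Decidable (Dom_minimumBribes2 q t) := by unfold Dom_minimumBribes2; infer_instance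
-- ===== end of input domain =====

-- B replaces A's O(n^2) nested scan by a displacement pass plus merge-sort inversion counting (O(n log n)).

-- ===== PORT A =====
-- inner loop: for j in range(i+1, n): if x > q[j]: sum += 1   (fold over the suffix)
def pvAInner (x : Int) (rest : List Int) (s : Int) : Int :=
  rest.foldl (fun s y => if x > y then s + 1 else s) s

-- outer loop with early return -1
def pvAGo : List Int → Int → Int → Int → Int
  | [], _, _, s => s
  | x :: rest, i, t, s =>
      if x - i - 1 > t then -1 else pvAGo rest (i + 1) t (pvAInner x rest s)

def minimumBribes2 (q : List Int) (t : Int) : Int := pvAGo q 0 t 0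

-- ===== PORT B =====
-- merge step of Source B's sort: returns merged list and the inversions added (len(left)-i each time a right element is taken)
def pvMerge : List Int → List Int → List Int × Int
  | [], r => (r, 0)
  | l, [] => (l, 0)
  | x :: ls, y :: rs =>
      if x ≤ y then
        let p := pvMerge ls (y :: rs)
        (x :: p.1, p.2)
      else
        let p := pvMerge (x :: ls) rs
        (y :: p.1, p.2 + ((ls.length : Int) + 1))

-- Source B's recursive sort returning (sorted list, inversion count)
def pvSort (a : List Int) : List Int × Int :=
  if h : a.length ≤ 1 then (a, 0)
  else
    let mid := a.length / 2
    let pl := pvSort (a.take mid)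
    let pr := pvSort (a.drop mid)
    let pm := pvMerge pl.1 pr.1
    (pm.1, pl.2 + pr.2 + pm.2)
termination_by a.length
decreasing_by
  · simp only [List.length_take]; omega
  · simp only [List.length_drop]; omega

def minimumBribes2_alt (q : List Int) (t : Int) : Int :=
  if (PySem.List.enumerate q).any (fun p => decide (p.2 - p.1 - 1 > t)) then -1
  else (pvSort q).2

-- ===== PRECONDITION & SPEC =====
def Spec_minimumBribes2 (q : List Int) (t : Int) (out : Int) : Prop := out = minimumBribes2_alt q t
instance (q : List Int) (t : Int) (out : Int) : Decidable (Spec_minimumBribes2 q t out) := by unfold Spec_minimumBribes2; infer_instance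

-- ===== CLAIM (what is proved, stated in full; the proofs are below) =====
def Claim_equal_minimumBribes2 : Prop := ∀ (q : List Int) (t : Int), Dom_minimumBribes2 q t → Spec_minimumBribes2 q t (minimumBribes2 q t)

-- ===== LEMMAS AND PROOFS =====

-- number of elements of l strictly below x
def cntLt (x : Int) (l : List Int) : Nat := l.countP (fun y => decide (y < x))
-- number of elements of l strictly above y
def cntGt (y : Int) (l : List Int) : Nat := l.countP (fun x => decide (y < x))
-- total inversions of l
def invN : List Int → Nat
  | [] => 0
  | x :: r => cntLt x r + invN r
-- cross inversions between the blocks L and R (pairs x ∈ L, y ∈ R with y < x)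
def crossN (L R : List Int) : Nat := (R.map (fun y => cntGt y L)).sum

theorem cntGt_perm (y : Int) {l l' : List Int} (h : l.Perm l') : cntGt y l = cntGt y l' := h.countP_eq _

theorem crossN_nil_left (R : List Int) : crossN [] R = 0 := by
  induction R with
  | nil => simp [crossN]
  | cons y rs ih => simpa [crossN, cntGt] using ih

theorem crossN_cons_right (L : List Int) (y : Int) (rs : List Int) :
    crossN L (y :: rs) = cntGt y L + crossN L rs := by
  simp [crossN]

theorem crossN_cons_left (x : Int) (L R : List Int) :
    crossN (x :: L) R = crossN L R + cntLt x R := by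
  induction R with
  | nil => simp [crossN, cntLt]
  | cons y rs ih =>
      rw [crossN_cons_right, crossN_cons_right, ih]
      by_cases h : y < x <;>
        simp only [cntGt, cntLt, List.countP_cons, h, decide_true, decide_false,
          if_true, if_false] <;> omega

theorem crossN_perm {L L' R R' : List Int} (hL : L.Perm L') (hR : R.Perm R') :
    crossN L R = crossN L' R' := by
  unfold crossN
  have h1 : (R.map (fun y => cntGt y L)).Perm (R'.map (fun y => cntGt y L)) := hR.map _
  rw [h1.sum_eq]
  have h2 : R'.map (fun y => cntGt y L) = R'.map (fun y => cntGt y L') :=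
    List.map_congr_left (fun y _ => cntGt_perm y hL)
  rw [h2]

theorem invN_append (a b : List Int) : invN (a ++ b) = invN a + invN b + crossN a b := by
  induction a with
  | nil => simp [invN, crossN_nil_left]
  | cons x a' ih =>
      simp only [List.cons_append, invN, ih, crossN_cons_left, cntLt, List.countP_append]
      omega

theorem pvMerge_perm (L R : List Int) : (pvMerge L R).1.Perm (L ++ R) := by
  induction L, R using pvMerge.induct with
  | case1 r => simp [pvMerge]
  | case2 l h =>
      cases l with
      | nil => exact absurd rfl h
      | cons a as => simp [pvMerge]
  | case3 x ls y rs h ih =>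
      simp only [pvMerge, if_pos h]
      exact (ih.cons x).trans (by simp)
  | case4 x ls y rs h ih =>
      simp only [pvMerge, if_neg h]
      refine (ih.cons y).trans ?_
      simpa using (List.perm_middle (a := y) (l₁ := x :: ls) (l₂ := rs)).symm

theorem pvMerge_sorted {L R : List Int} (hL : L.Pairwise (· ≤ ·)) (hR : R.Pairwise (· ≤ ·)) :
    (pvMerge L R).1.Pairwise (· ≤ ·) := by
  induction L, R using pvMerge.induct with
  | case1 r => simpa [pvMerge] using hR
  | case2 l h =>
      cases l with
      | nil => exact absurd rfl h
      | cons a as => simpa [pvMerge] using hL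
  | case3 x ls y rs h ih =>
      simp only [pvMerge, if_pos h]
      rw [List.pairwise_cons]
      refine ⟨?_, ih (List.pairwise_cons.mp hL).2 hR⟩
      intro b hb
      have hmem : b ∈ ls ++ y :: rs := (pvMerge_perm ls (y :: rs)).mem_iff.mp hb
      rcases List.mem_append.mp hmem with h1 | h1
      · exact (List.pairwise_cons.mp hL).1 b h1
      · rcases List.mem_cons.mp h1 with rfl | h2
        · exact h
        · exact le_trans h ((List.pairwise_cons.mp hR).1 b h2)
  | case4 x ls y rs h ih =>
      simp only [pvMerge, if_neg h]
      rw [List.pairwise_cons]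
      refine ⟨?_, ih hL (List.pairwise_cons.mp hR).2⟩
      intro b hb
      have hmem : b ∈ (x :: ls) ++ rs := (pvMerge_perm (x :: ls) rs).mem_iff.mp hb
      have hyx : y ≤ x := (not_le.mp h).le
      rcases List.mem_append.mp hmem with h1 | h1
      · rcases List.mem_cons.mp h1 with rfl | h2
        · exact hyx
        · exact le_trans hyx ((List.pairwise_cons.mp hL).1 b h2)
      · exact (List.pairwise_cons.mp hR).1 b h1

theorem pvMerge_count {L R : List Int} (hL : L.Pairwise (· ≤ ·)) (hR : R.Pairwise (· ≤ ·)) :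
    (pvMerge L R).2 = (crossN L R : Int) := by
  induction L, R using pvMerge.induct with
  | case1 r => simp [pvMerge, crossN_nil_left]
  | case2 l h =>
      cases l with
      | nil => exact absurd rfl h
      | cons a as => simp [pvMerge, crossN]
  | case3 x ls y rs h ih =>
      simp only [pvMerge, if_pos h]
      have hih := ih (List.pairwise_cons.mp hL).2 hR
      have hc : cntLt x (y :: rs) = 0 := by
        unfold cntLt
        rw [List.countP_eq_zero]
        intro b hb
        rcases List.mem_cons.mp hb with rfl | h2
        · simp; omega
        · have : y ≤ b := (List.pairwise_cons.mp hR).1 b h2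
          simp; omega
      rw [hih, crossN_cons_left, hc]
      simp
  | case4 x ls y rs h ih =>
      simp only [pvMerge, if_neg h]
      have hih := ih hL (List.pairwise_cons.mp hR).2
      have hall : cntGt y (x :: ls) = (x :: ls).length := by
        unfold cntGt
        rw [List.countP_eq_length]
        intro b hb
        rcases List.mem_cons.mp hb with rfl | h2
        · simp; omega
        · have : x ≤ b := (List.pairwise_cons.mp hL).1 b h2
          simp; omega
      rw [hih, crossN_cons_right, hall]
      simp only [List.length_cons]
      push_cast
      ring

theorem pvSort_correct (a : List Int) :
    (pvSort a).1.Perm a ∧ (pvSort a).1.Pairwise (· ≤ ·) ∧ (pvSort a).2 = (invN a : Int) := by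
  induction a using pvSort.induct with
  | case1 a h =>
      rw [pvSort, dif_pos h]
      refine ⟨List.Perm.refl a, ?_, ?_⟩
      · match a, h with
        | [], _ => simp
        | [x], _ => simp
      · match a, h with
        | [], _ => simp [invN]
        | [x], _ => simp [invN, cntLt]
  | case2 a h mid ihl ihr =>
      rw [pvSort, dif_neg h]
      simp only
      obtain ⟨pL, sL, cL⟩ := ihl
      obtain ⟨pR, sR, cR⟩ := ihr
      refine ⟨?_, ?_, ?_⟩
      · refine (pvMerge_perm _ _).trans ?_
        refine (pL.append pR).trans ?_
        rw [List.take_append_drop]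
      · exact pvMerge_sorted sL sR
      · have hmc := pvMerge_count sL sR
        have hcx : crossN (pvSort (a.take mid)).1 (pvSort (a.drop mid)).1
            = crossN (a.take mid) (a.drop mid) := crossN_perm pL pR
        have hinv : invN a = invN (a.take mid) + invN (a.drop mid)
            + crossN (a.take mid) (a.drop mid) := by
          conv_lhs => rw [← List.take_append_drop mid a]
          exact invN_append _ _
        rw [hmc, hcx, cL, cR, hinv]
        push_cast
        ring

-- A's early-exit condition as a boolean recursion
def badB : List Int → Int → Int → Bool
  | [], _, _ => false
  | x :: r, i, t => decide (x - i - 1 > t) || badB r (i + 1) t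

theorem pvAInner_eq (x : Int) (rest : List Int) (s : Int) :
    pvAInner x rest s = s + (cntLt x rest : Nat) := by
  induction rest generalizing s with
  | nil => simp [pvAInner, cntLt]
  | cons y r ih =>
      simp only [pvAInner, List.foldl_cons] at *
      by_cases h : y < x
      · rw [if_pos (show x > y from h), ih]
        simp [cntLt, List.countP_cons, h]
        push_cast
        ring
      · rw [if_neg (show ¬ x > y from h), ih]
        simp [cntLt, List.countP_cons, h]
  
theorem pvAGo_eq (l : List Int) (i t s : Int) :
    pvAGo l i t s = if badB l i t then -1 else s + (invN l : Int) := by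
  induction l generalizing i s with
  | nil => simp [pvAGo, badB, invN]
  | cons x r ih =>
      simp only [pvAGo, badB]
      by_cases h : x - i - 1 > t
      · simp [h]
      · simp only [decide_eq_true_eq, if_neg h, h, decide_false, Bool.false_or, ih,
          pvAInner_eq, invN]
        by_cases hb : badB r (i + 1) t
        · simp [hb]
        · simp [hb]
          push_cast
          ring

theorem any_enumerate_eq_badB (q : List Int) (t : Int) (i : Int) :
    (PySem.List.enumerate q i).any (fun p => decide (p.2 - p.1 - 1 > t)) = badB q i t := by
  induction q generalizing i with
  | nil => simp [PySem.List.enumerate_nil, badB]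
  | cons x r ih => simp [PySem.List.enumerate_cons, badB, ih]

-- ===== VERDICT (by name: the statement is the Claim_ definition above) =====
theorem minimumBribes2_spec : Claim_equal_minimumBribes2 := by
  intro q t _
  unfold Spec_minimumBribes2 minimumBribes2 minimumBribes2_alt
  rw [pvAGo_eq]
  rw [show (PySem.List.enumerate q).any (fun p => decide (p.2 - p.1 - 1 > t)) = badB q 0 t from
    any_enumerate_eq_badB q t 0]
  split
  · rfl
  · rw [(pvSort_correct q).2.2]
    simp
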